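-- pv_equiv track=rewrite | github.com/pramud/semantic-search | agent/final/app.py | get_function_details
-- ===== SOURCE A (Python) =====
-- def get_function_details(parsed_data, function_name):
--     """Get all details about a function and its call stack from the parsed data."""
--     functions = parsed_data.get("functions", [])
--     call_graph = parsed_data.get("call_graph", [])
--
--     # Find the target function
--     target_func = None
--     for func in functions:
--         if func["qualified_name"] == function_name:
--             target_func = func
--             break
--
--     if not target_func:
--         return None, [], []
--
--     # Get functions called by this function (direct calls)
--     called_functions = []
--     for edge in call_graph:
--         if edge["from"] == function_name:
--             called_func = next((f for f in functions if f["qualified_name"] == edge["to"]), None)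
--             if called_func:
--                 called_functions.append(called_func)
--
--     # Get functions that call this function (callers)
--     calling_functions = []
--     for edge in call_graph:
--         if edge["to"] == function_name:
--             caller_func = next((f for f in functions if f["qualified_name"] == edge["from"]), None)
--             if caller_func:
--                 calling_functions.append(caller_func)
--
--     return target_func, called_functions, calling_functions
-- ===== SOURCE B (Python) =====
-- def get_function_details(parsed_data, function_name):
--     """Precompute a name->function index and full call-graph adjacency maps once,
--     then read target/callees/callers straight off them (no per-edge scanning)."""
--     functions = parsed_data.get("functions", [])
--     call_graph = parsed_data.get("call_graph", [])
--
--     # First-wins index of functions by qualified name; records without the key are ignored.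
--     index = {}
--     for func in functions:
--         name = func.get("qualified_name")
--         if name is not None and name not in index:
--             index[name] = func
--
--     # Query-independent adjacency maps of the whole graph (name -> neighbour names,
--     # in edge order); edges missing an endpoint are ignored.
--     outgoing = {}
--     incoming = {}
--     for edge in call_graph:
--         src, dst = edge.get("from"), edge.get("to")
--         if src is not None and dst is not None:
--             outgoing.setdefault(src, []).append(dst)
--             incoming.setdefault(dst, []).append(src)
--
--     target_func = index.get(function_name)
--     if target_func is None:
--         return None, [], []
--
--     called_functions = [index[t] for t in outgoing.get(function_name, []) if t in index]
--     calling_functions = [index[s] for s in incoming.get(function_name, []) if s in index]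
--     return target_func, called_functions, calling_functions
-- ===== Notes on version B (the rewrite author's own statement) =====
-- stated objective: alternative
-- what changed: B precomputes a first-wins qualified_name->function index and full outgoing/incoming adjacency maps of the whole call graph in single passes, then reads target, callees and callers straight off these maps with no per-edge scanning of the functions list and no per-query pass over the graph.
import Mathlib
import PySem

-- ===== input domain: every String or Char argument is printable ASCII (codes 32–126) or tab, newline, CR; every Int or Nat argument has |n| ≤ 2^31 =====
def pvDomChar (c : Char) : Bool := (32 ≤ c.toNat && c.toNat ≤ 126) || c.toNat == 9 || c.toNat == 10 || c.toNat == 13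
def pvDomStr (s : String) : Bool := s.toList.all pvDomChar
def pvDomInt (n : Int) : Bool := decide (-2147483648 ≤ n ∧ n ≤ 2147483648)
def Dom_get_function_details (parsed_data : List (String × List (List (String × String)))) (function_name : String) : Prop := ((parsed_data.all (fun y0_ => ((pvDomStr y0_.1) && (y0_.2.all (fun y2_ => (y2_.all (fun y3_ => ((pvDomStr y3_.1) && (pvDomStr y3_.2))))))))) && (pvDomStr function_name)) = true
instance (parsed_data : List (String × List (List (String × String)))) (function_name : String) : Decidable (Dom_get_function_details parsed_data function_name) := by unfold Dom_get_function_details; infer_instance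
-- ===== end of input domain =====

-- B precomputes a first-wins name→function index and full outgoing/incoming adjacency maps of the
-- whole call graph once, then reads target/callees/callers straight off them (no per-edge scans).

-- ===== PORT A =====
-- Python dict access d[k]/comparison value on an assoc list (first match). Inside Pre_ every key
-- a scan of A actually reads is present, so the "" default never decides a comparison.
def pvGet (d : List (String × String)) (k : String) : String := (List.lookup k d).getD ""

-- A's 'first function whose qualified_name equals t' linear scan (target search and next(...)).
def pvFindFunc (functions : List (List (String × String))) (t : String) :
    Option (List (String × String)) :=
  match functions with
  | [] => none
  | f :: rest => if pvGet f "qualified_name" == t then some f else pvFindFunc rest t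

def get_function_details (parsed_data : List (String × List (List (String × String)))) (function_name : String) : (Option (List (String × String))) × (List (List (String × String))) × (List (List (String × String))) :=
  let functions := (List.lookup "functions" parsed_data).getD []
  let call_graph := (List.lookup "call_graph" parsed_data).getD []
  match pvFindFunc functions function_name with
  | none => (none, [], [])
  | some t =>
    if t = [] then (none, [], [])  -- 'if not target_func' truthiness (empty dict is falsy)
    else
      let called := call_graph.foldl (fun acc e =>
        if pvGet e "from" == function_name then
          match pvFindFunc functions (pvGet e "to") with
          | some f => if f = [] then acc else acc ++ [f]  -- 'if called_func' truthiness
          | none => acc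
        else acc) []
      let calling := call_graph.foldl (fun acc e =>
        if pvGet e "to" == function_name then
          match pvFindFunc functions (pvGet e "from") with
          | some f => if f = [] then acc else acc ++ [f]
          | none => acc
        else acc) []
      (some t, called, calling)

-- ===== PORT B =====
-- First-wins index of functions by qualified name; records without the key are ignored.
def pvIndexB (functions : List (List (String × String))) :
    PySem.Dict String (List (String × String)) :=
  functions.foldl (fun d f =>
    match List.lookup "qualified_name" f with
    | none => d
    | some n => if d.contains n then d else d.insert n f) PySem.Dict.empty

-- One pass over the call graph building BOTH adjacency maps (name -> neighbour names, in edge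
-- order); edges missing an endpoint are ignored (Source B's 'is not None' guard).
def pvAdj (call_graph : List (List (String × String))) :
    PySem.Dict String (List String) × PySem.Dict String (List String) :=
  call_graph.foldl (fun p e =>
    match List.lookup "from" e, List.lookup "to" e with
    | some src, some dst =>
        (p.1.modify src [] (· ++ [dst]), p.2.modify dst [] (· ++ [src]))
    | _, _ => p) (PySem.Dict.empty, PySem.Dict.empty)

-- '[index[t] for t in names if t in index]'
def pvResolve (index : PySem.Dict String (List (String × String))) (names : List String) :
    List (List (String × String)) :=
  names.foldl (fun acc t =>
    match index.get? t with
    | some f => acc ++ [f]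
    | none => acc) []

def get_function_details_alt (parsed_data : List (String × List (List (String × String)))) (function_name : String) : (Option (List (String × String))) × (List (List (String × String))) × (List (List (String × String))) :=
  let functions := (List.lookup "functions" parsed_data).getD []
  let call_graph := (List.lookup "call_graph" parsed_data).getD []
  let index := pvIndexB functions
  let adj := pvAdj call_graph
  match index.get? function_name with
  | none => (none, [], [])
  | some t =>
      (some t,
       pvResolve index ((adj.1.getD function_name [])),
       pvResolve index ((adj.2.getD function_name [])))

-- ===== PRECONDITION & SPEC =====
-- okScanB F t: A's linear scan of F for name t never reads a record lacking "qualified_name":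
-- every keyless record is preceded by a match for t (so the scan stops before reaching it).
def okScanB (F : List (List (String × String))) (t : String) : Bool :=
  (List.range F.length).all (fun i =>
    (List.lookup "qualified_name" (F.getD i [])).isSome ||
    (F.take i).any (fun f => List.lookup "qualified_name" f == some t))

-- Pre_ is EXACTLY the set of inputs on which Python A returns; outside it A raises KeyError
-- (a record without "qualified_name" reached by a scan, or — once the target is found — an edge
-- without "from"/"to"). It excludes no input on which A returns a value.
def Pre_get_function_details (parsed_data : List (String × List (List (String × String)))) (function_name : String) : Prop :=
  let F := (List.lookup "functions" parsed_data).getD []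
  let G := (List.lookup "call_graph" parsed_data).getD []
  okScanB F function_name = true ∧
  (F.any (fun f => List.lookup "qualified_name" f == some function_name) = true →
    ∀ e ∈ G, (List.lookup "from" e).isSome = true ∧ (List.lookup "to" e).isSome = true ∧
      (List.lookup "from" e = some function_name → okScanB F ((List.lookup "to" e).getD "") = true) ∧
      (List.lookup "to" e = some function_name → okScanB F ((List.lookup "from" e).getD "") = true))
instance (parsed_data : List (String × List (List (String × String)))) (function_name : String) : Decidable (Pre_get_function_details parsed_data function_name) := by unfold Pre_get_function_details; infer_instance

def pvWitness_get_function_details : (List (String × List (List (String × String)))) × String :=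
  ([("functions", [[("qualified_name", "f")], [("qualified_name", "g")]]),
    ("call_graph", [[("from", "f"), ("to", "g")], [("from", "g"), ("to", "f")]])], "f")

def Spec_get_function_details (parsed_data : List (String × List (List (String × String)))) (function_name : String) (out : (Option (List (String × String))) × (List (List (String × String))) × (List (List (String × String)))) : Prop := out = get_function_details_alt parsed_data function_name
instance (parsed_data : List (String × List (List (String × String)))) (function_name : String) (out : (Option (List (String × String))) × (List (List (String × String))) × (List (List (String × String)))) : Decidable (Spec_get_function_details parsed_data function_name out) := by unfold Spec_get_function_details; infer_instance

-- ===== CLAIM (what is proved, stated in full; the proofs are below) =====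
def Claim_equal_get_function_details : Prop := ∀ (parsed_data : List (String × List (List (String × String)))) (function_name : String), Dom_get_function_details parsed_data function_name → Pre_get_function_details parsed_data function_name → Spec_get_function_details parsed_data function_name (get_function_details parsed_data function_name)
-- ===== LEMMAS AND PROOFS =====

-- A's scan predicate, shared by all lemmas
def pvHasName (t : String) (f : List (String × String)) : Bool :=
  List.lookup "qualified_name" f == some t

theorem okScan_head (f : List (String × String)) (rest : List (List (String × String)))
    (t : String) (h : okScanB (f :: rest) t = true) :
    (List.lookup "qualified_name" f).isSome = true := by
  have h0 := (List.all_eq_true.mp h) 0 (by simp)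
  simpa using h0

theorem okScan_tail (f : List (String × String)) (rest : List (List (String × String)))
    (t : String) (h : okScanB (f :: rest) t = true)
    (hne : (List.lookup "qualified_name" f == some t) = false) :
    okScanB rest t = true := by
  apply List.all_eq_true.mpr
  intro i hi
  have hi' : i ∈ List.range rest.length := hi
  have hlt : i < rest.length := List.mem_range.mp hi'
  have h1 := (List.all_eq_true.mp h) (i + 1)
    (List.mem_range.mpr (by simp; omega))
  simpa [List.take_succ_cons, List.any_cons, hne] using h1

theorem pvFindFunc_eq_find? (F : List (List (String × String))) (t : String)
    (h : okScanB F t = true) :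
    pvFindFunc F t = F.find? (pvHasName t) := by
  induction F with
  | nil => rfl
  | cons f rest ih =>
    have hk := okScan_head f rest t h
    obtain ⟨v, hv⟩ := Option.isSome_iff_exists.mp hk
    by_cases hvt : v = t
    · subst hvt
      simp [pvFindFunc, pvGet, hv, pvHasName]
    · have hne : (List.lookup "qualified_name" f == some t) = false := by
        simp [hv, hvt]
      rw [pvFindFunc, List.find?_cons_of_neg (by simpa [pvHasName] using hne)]
      rw [if_neg (by simp [pvGet, hv, hvt])]
      exact ih (okScan_tail f rest t h hne)

theorem get?_pvIndexB_foldl (fs : List (List (String × String)))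
    (d : PySem.Dict String (List (String × String))) (t : String) :
    (fs.foldl (fun d f =>
      match List.lookup "qualified_name" f with
      | none => d
      | some n => if d.contains n then d else d.insert n f) d).get? t
    = (d.get? t).or (fs.find? (pvHasName t)) := by
  induction fs generalizing d with
  | nil => simp
  | cons f rest ih =>
    simp only [List.foldl_cons]
    cases hq : List.lookup "qualified_name" f with
    | none =>
      dsimp only
      rw [ih, List.find?_cons_of_neg (by simp [pvHasName, hq])]
    | some n =>
      dsimp only
      by_cases hn : n = t
      · subst hn
        rw [List.find?_cons_of_pos (by simp [pvHasName, hq])]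
        by_cases hc : d.contains n = true
        · rw [if_pos hc, ih]
          rw [PySem.Dict.contains_eq_isSome_get?] at hc
          obtain ⟨v, hv⟩ := Option.isSome_iff_exists.mp hc
          simp [hv]
        · rw [if_neg hc, ih]
          rw [PySem.Dict.contains_eq_isSome_get?] at hc
          have hnone : d.get? n = none := by
            cases h : d.get? n <;> simp [h] at hc ⊢
          simp [hnone, PySem.Dict.get?_insert_self]
      · rw [List.find?_cons_of_neg (by simp [pvHasName, hq, hn])]
        by_cases hc : d.contains n = true
        · rw [if_pos hc, ih]
        · rw [if_neg hc, ih, PySem.Dict.get?_insert_of_ne _ _ (Ne.symm hn)]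

theorem get?_pvIndexB (fs : List (List (String × String))) (t : String) :
    (pvIndexB fs).get? t = fs.find? (pvHasName t) := by
  unfold pvIndexB
  rw [get?_pvIndexB_foldl]
  simp

-- generic: a loop that skips unselected elements is a loop over the selected ones
theorem foldl_match_filterMap {α β γ : Type} (sel : α → Option β) (g : γ → β → γ)
    (l : List α) (init : γ) :
    l.foldl (fun acc x =>
      match sel x with
      | some y => g acc y
      | none => acc) init
    = (l.filterMap sel).foldl g init := by
  induction l generalizing init with
  | nil => rfl
  | cons x xs ih => cases h : sel x <;> simp [h, ih]

-- the selected (from, to) pairs of the call graph, in edge order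
def pvEdgePairs (G : List (List (String × String))) : List (String × String) :=
  G.filterMap (fun e =>
    match List.lookup "from" e, List.lookup "to" e with
    | some src, some dst => some (src, dst)
    | _, _ => none)

theorem pvAdj_foldl_aux (G : List (List (String × String)))
    (p : PySem.Dict String (List String) × PySem.Dict String (List String)) :
    G.foldl (fun p e =>
      match List.lookup "from" e, List.lookup "to" e with
      | some src, some dst =>
          (p.1.modify src [] (· ++ [dst]), p.2.modify dst [] (· ++ [src]))
      | _, _ => p) p
    = ((pvEdgePairs G).foldl (fun d pr => d.modify pr.1 [] (· ++ [pr.2])) p.1,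
       (pvEdgePairs G).foldl (fun d pr => d.modify pr.2 [] (· ++ [pr.1])) p.2) := by
  induction G generalizing p with
  | nil => simp [pvEdgePairs]
  | cons e rest ih =>
    rw [List.foldl_cons]
    cases hs : List.lookup "from" e with
    | none =>
      have hp : pvEdgePairs (e :: rest) = pvEdgePairs rest := by
        simp [pvEdgePairs, hs]
      rw [hp]; dsimp only; exact ih p
    | some s =>
      cases hd : List.lookup "to" e with
      | none =>
        have hp : pvEdgePairs (e :: rest) = pvEdgePairs rest := by
          simp [pvEdgePairs, hs, hd]
        rw [hp]; dsimp only; exact ih p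
      | some d =>
        have hp : pvEdgePairs (e :: rest) = (s, d) :: pvEdgePairs rest := by
          simp [pvEdgePairs, hs, hd]
        rw [hp, List.foldl_cons, List.foldl_cons]
        dsimp only
        exact ih (p.1.modify s [] (· ++ [d]), p.2.modify d [] (· ++ [s]))

theorem pvAdj_eq (G : List (List (String × String))) :
    pvAdj G
    = ((pvEdgePairs G).foldl (fun d pr => d.modify pr.1 [] (· ++ [pr.2])) PySem.Dict.empty,
       (pvEdgePairs G).foldl (fun d pr => d.modify pr.2 [] (· ++ [pr.1])) PySem.Dict.empty) := by
  unfold pvAdj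
  exact pvAdj_foldl_aux G (PySem.Dict.empty, PySem.Dict.empty)

theorem foldl_swap (pairs : List (String × String))
    (init : PySem.Dict String (List String)) :
    pairs.foldl (fun d pr => d.modify pr.2 [] (· ++ [pr.1])) init
    = (pairs.map Prod.swap).foldl (fun d pr => d.modify pr.1 [] (· ++ [pr.2])) init := by
  rw [List.foldl_map]
  rfl

-- selection of the 'to'-names of edges leaving fname / the 'from'-names of edges entering fname
def selCalled (fname : String) (e : List (String × String)) : Option String :=
  match List.lookup "from" e, List.lookup "to" e with
  | some src, some dst => if src == fname then some dst else none
  | _, _ => none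

def selCalling (fname : String) (e : List (String × String)) : Option String :=
  match List.lookup "from" e, List.lookup "to" e with
  | some src, some dst => if dst == fname then some src else none
  | _, _ => none

theorem foldA_called (F G : List (List (String × String))) (fname : String)
    (hE : ∀ e ∈ G, (List.lookup "from" e).isSome = true ∧ (List.lookup "to" e).isSome = true) :
    G.foldl (fun acc e =>
      if pvGet e "from" == fname then
        match pvFindFunc F (pvGet e "to") with
        | some f => if f = [] then acc else acc ++ [f]
        | none => acc
      else acc) []
    = (G.filterMap (selCalled fname)).foldl (fun acc t =>
        match pvFindFunc F t with
        | some f => if f = [] then acc else acc ++ [f]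
        | none => acc) [] := by
  rw [← foldl_match_filterMap]
  apply PySem.List.foldl_congr_mem
  intro acc e he
  obtain ⟨h1, h2⟩ := hE e he
  obtain ⟨s, hs⟩ := Option.isSome_iff_exists.mp h1
  obtain ⟨d, hd⟩ := Option.isSome_iff_exists.mp h2
  simp only [selCalled, pvGet, hs, hd, Option.getD_some]
  by_cases hsf : (s == fname) = true <;> simp [hsf]

theorem foldA_calling (F G : List (List (String × String))) (fname : String)
    (hE : ∀ e ∈ G, (List.lookup "from" e).isSome = true ∧ (List.lookup "to" e).isSome = true) :
    G.foldl (fun acc e =>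
      if pvGet e "to" == fname then
        match pvFindFunc F (pvGet e "from") with
        | some f => if f = [] then acc else acc ++ [f]
        | none => acc
      else acc) []
    = (G.filterMap (selCalling fname)).foldl (fun acc t =>
        match pvFindFunc F t with
        | some f => if f = [] then acc else acc ++ [f]
        | none => acc) [] := by
  rw [← foldl_match_filterMap]
  apply PySem.List.foldl_congr_mem
  intro acc e he
  obtain ⟨h1, h2⟩ := hE e he
  obtain ⟨s, hs⟩ := Option.isSome_iff_exists.mp h1
  obtain ⟨d, hd⟩ := Option.isSome_iff_exists.mp h2
  simp only [selCalling, pvGet, hs, hd, Option.getD_some]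
  by_cases hdf : (d == fname) = true <;> simp [hdf]

theorem filterPairs_called (G : List (List (String × String))) (fname : String) :
    List.map (fun x => x.2) (List.filter (fun p => p.1 == fname) (pvEdgePairs G))
    = G.filterMap (selCalled fname) := by
  unfold pvEdgePairs
  rw [List.filter_filterMap, List.map_filterMap]
  apply List.filterMap_congr
  intro e _
  cases hs : List.lookup "from" e with
  | none => simp [selCalled, Option.filter, hs]
  | some s =>
    cases hd : List.lookup "to" e with
    | none => simp [selCalled, Option.filter, hs, hd]
    | some d =>
      by_cases h : (s == fname) = true <;> simp [selCalled, Option.filter, hs, hd, h]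

theorem filterPairs_calling (G : List (List (String × String))) (fname : String) :
    List.map (fun x => x.2) (List.filter (fun p => p.1 == fname) ((pvEdgePairs G).map Prod.swap))
    = G.filterMap (selCalling fname) := by
  unfold pvEdgePairs
  rw [List.map_filterMap, List.filter_filterMap, List.map_filterMap]
  apply List.filterMap_congr
  intro e _
  cases hs : List.lookup "from" e with
  | none => simp [selCalling, Option.filter, hs]
  | some s =>
    cases hd : List.lookup "to" e with
    | none => simp [selCalling, Option.filter, hs, hd]
    | some d =>
      by_cases h : (d == fname) = true <;> simp [selCalling, Option.filter, hs, hd, h]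

theorem resolve_congr (F : List (List (String × String))) (L : List String)
    (hok : ∀ t ∈ L, okScanB F t = true) :
    L.foldl (fun acc t =>
      match pvFindFunc F t with
      | some f => if f = [] then acc else acc ++ [f]
      | none => acc) []
    = pvResolve (pvIndexB F) L := by
  unfold pvResolve
  apply PySem.List.foldl_congr_mem
  intro acc t ht
  rw [pvFindFunc_eq_find? F t (hok t ht), get?_pvIndexB]
  cases hf : F.find? (pvHasName t) with
  | none => rfl
  | some f =>
    have hP : pvHasName t f = true := List.find?_some hf
    have hne : f ≠ [] := by intro h; subst h; simp [pvHasName] at hP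
    simp [hne]

theorem hok_called (F G : List (List (String × String))) (fname : String)
    (hedges : ∀ e ∈ G, (List.lookup "from" e).isSome = true ∧ (List.lookup "to" e).isSome = true ∧
      (List.lookup "from" e = some fname → okScanB F ((List.lookup "to" e).getD "") = true) ∧
      (List.lookup "to" e = some fname → okScanB F ((List.lookup "from" e).getD "") = true)) :
    ∀ t ∈ G.filterMap (selCalled fname), okScanB F t = true := by
  intro t ht
  obtain ⟨e, he, hsel⟩ := List.mem_filterMap.mp ht
  obtain ⟨_, _, h3, _⟩ := hedges e he
  unfold selCalled at hsel
  cases hs : List.lookup "from" e with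
  | none => rw [hs] at hsel; exact absurd hsel (by simp)
  | some s =>
    cases hd : List.lookup "to" e with
    | none => rw [hs, hd] at hsel; exact absurd hsel (by simp)
    | some d =>
      rw [hs, hd] at hsel
      by_cases hsf : (s == fname) = true
      · have hst : d = t := by simpa [hsf] using hsel
        subst hst
        have : s = fname := by simpa using hsf
        subst this
        simpa [hd] using h3 hs
      · simp [hsf] at hsel

theorem hok_calling (F G : List (List (String × String))) (fname : String)
    (hedges : ∀ e ∈ G, (List.lookup "from" e).isSome = true ∧ (List.lookup "to" e).isSome = true ∧
      (List.lookup "from" e = some fname → okScanB F ((List.lookup "to" e).getD "") = true) ∧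
      (List.lookup "to" e = some fname → okScanB F ((List.lookup "from" e).getD "") = true)) :
    ∀ t ∈ G.filterMap (selCalling fname), okScanB F t = true := by
  intro t ht
  obtain ⟨e, he, hsel⟩ := List.mem_filterMap.mp ht
  obtain ⟨_, _, _, h4⟩ := hedges e he
  unfold selCalling at hsel
  cases hs : List.lookup "from" e with
  | none => rw [hs] at hsel; exact absurd hsel (by simp)
  | some s =>
    cases hd : List.lookup "to" e with
    | none => rw [hs, hd] at hsel; exact absurd hsel (by simp)
    | some d =>
      rw [hs, hd] at hsel
      by_cases hdf : (d == fname) = true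
      · have hst : s = t := by simpa [hdf] using hsel
        subst hst
        have : d = fname := by simpa using hdf
        subst this
        simpa [hs] using h4 hd
      · simp [hdf] at hsel

-- ===== VERDICT (by name: the statement is the Claim_ definition above) =====
theorem get_function_details_spec : Claim_equal_get_function_details := by
  intro parsed_data function_name _hdom hpre
  simp only [Pre_get_function_details] at hpre
  obtain ⟨hscan, hedges⟩ := hpre
  simp only [Spec_get_function_details, get_function_details, get_function_details_alt]
  rw [get?_pvIndexB, ← pvFindFunc_eq_find? _ _ hscan]
  cases htgt : pvFindFunc ((List.lookup "functions" parsed_data).getD []) function_name with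
  | none => rfl
  | some t =>
    dsimp only
    rw [pvFindFunc_eq_find? _ _ hscan] at htgt
    have hP : pvHasName function_name t = true := List.find?_some htgt
    have hmem : t ∈ (List.lookup "functions" parsed_data).getD [] :=
      List.mem_of_find?_eq_some htgt
    have htne : ¬ t = [] := by intro h; subst h; simp [pvHasName] at hP
    have hany : ((List.lookup "functions" parsed_data).getD []).any
        (fun f => List.lookup "qualified_name" f == some function_name) = true :=
      List.any_eq_true.mpr ⟨t, hmem, hP⟩
    have hed := hedges hany
    have hE : ∀ e ∈ (List.lookup "call_graph" parsed_data).getD [],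
        (List.lookup "from" e).isSome = true ∧ (List.lookup "to" e).isSome = true :=
      fun e he => ⟨(hed e he).1, (hed e he).2.1⟩
    rw [if_neg htne]
    rw [foldA_called _ _ _ hE, foldA_calling _ _ _ hE, pvAdj_eq]
    dsimp only
    rw [foldl_swap]
    simp only [PySem.Dict.getD_foldl_modify_append, PySem.Dict.getD_empty, List.nil_append]
    rw [filterPairs_called, filterPairs_calling]
    rw [resolve_congr _ _ (hok_called _ _ _ hed), resolve_congr _ _ (hok_calling _ _ _ hed)]
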